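-- pv_equiv track=rewrite | github.com/Psikyy/KATARENGA-Co | quadrants.py | checkQuart
-- ===== SOURCE A (Python) =====
-- def checkQuart(quart: list) -> bool:
--     """
--         Vérifie si un quadrant de 4x4 est valide.
--         Un quadrant est valide s'il contient exactement 4 couleurs différentes,
--         chacune apparaissant exactement 4 fois.
--     """
--     colors = {'blue': 0, 'green': 0, 'red': 0, 'yellow': 0}
--     for i in range(len(quart)):
--         for elt in quart[i]:
--             if elt in colors.keys():
--                 colors[elt] += 1
--     for valeurs in colors.values():
--         if valeurs != 4:
--             return False
--     return True
-- ===== SOURCE B (Python) =====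
-- def checkQuart(quart: list) -> bool:
--     # Sort-and-compare: the quadrant is valid iff the color cells, sorted,
--     # form exactly the canonical sorted multiset of 4 of each color.
--     kept = sorted(e for row in quart for e in row
--                   if e in ('blue', 'green', 'red', 'yellow'))
--     return kept == ['blue'] * 4 + ['green'] * 4 + ['red'] * 4 + ['yellow'] * 4
-- ===== Notes on version B (the rewrite author's own statement) =====
-- stated objective: alternative
-- what changed: Replaces A's mutable per-color count table (built in a nested pass, then scanned for a non-4 entry) by a sort-and-compare: filter out the color cells, sort them, and compare with the one canonical sorted list of four of each color.
import Mathlib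
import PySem

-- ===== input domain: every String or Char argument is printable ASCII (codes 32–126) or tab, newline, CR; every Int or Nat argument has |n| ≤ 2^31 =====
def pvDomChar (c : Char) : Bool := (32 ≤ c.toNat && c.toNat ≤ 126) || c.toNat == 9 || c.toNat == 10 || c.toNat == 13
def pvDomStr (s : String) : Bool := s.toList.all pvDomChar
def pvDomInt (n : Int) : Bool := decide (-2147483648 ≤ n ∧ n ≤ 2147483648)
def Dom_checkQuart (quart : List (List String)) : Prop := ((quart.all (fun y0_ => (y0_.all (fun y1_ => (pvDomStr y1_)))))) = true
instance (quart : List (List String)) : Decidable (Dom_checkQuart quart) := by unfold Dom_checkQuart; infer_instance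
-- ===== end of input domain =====

-- B replaces A's mutable per-color count table by sort-and-compare: filter the color
-- cells, sort them, and compare with the canonical sorted list of four of each color.

-- ===== PORT A =====
def checkQuart (quart : List (List String)) : Bool :=
  let colors : PySem.Dict String Int :=
    ((((PySem.Dict.empty).insert "blue" 0).insert "green" 0).insert "red" 0).insert "yellow" 0
  let colors :=
    (PySem.List.pyRange 0 (PySem.List.len quart) 1).foldl (fun d i =>
      (PySem.List.pyGetD quart i []).foldl (fun d elt =>
        if d.contains elt then d.modify elt 0 (· + 1) else d) d) colors
  colors.values.all (fun valeurs => valeurs == 4)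

-- ===== PORT B =====
-- the canonical target list ['blue']*4 + ['green']*4 + ['red']*4 + ['yellow']*4
def pvTarget : List String :=
  List.replicate 4 "blue" ++ List.replicate 4 "green" ++
  List.replicate 4 "red" ++ List.replicate 4 "yellow"

def checkQuart_alt (quart : List (List String)) : Bool :=
  let kept := PySem.List.sorted
    (quart.flatMap (fun row => row.filter (fun e => ["blue", "green", "red", "yellow"].contains e)))
    (fun x => x) false
  kept == pvTarget

-- ===== PRECONDITION & SPEC =====
def Spec_checkQuart (quart : List (List String)) (out : Bool) : Prop := out = checkQuart_alt quart
instance (quart : List (List String)) (out : Bool) : Decidable (Spec_checkQuart quart out) := by unfold Spec_checkQuart; infer_instance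

-- ===== CLAIM (what is proved, stated in full; the proofs are below) =====
def Claim_equal_checkQuart : Prop := ∀ (quart : List (List String)), Dom_checkQuart quart → Spec_checkQuart quart (checkQuart quart)

-- ===== LEMMAS AND PROOFS =====

-- A's inner update step over one element.
def pvStep (d : PySem.Dict String Int) (elt : String) : PySem.Dict String Int :=
  if d.contains elt then d.modify elt 0 (· + 1) else d

lemma pvStep_keys (d : PySem.Dict String Int) (e : String) : (pvStep d e).keys = d.keys := by
  unfold pvStep
  split
  · rename_i h
    simp [PySem.Dict.keys_modify, PySem.Dict.keys_insert_of_contains d _ h]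
  · rfl

lemma pvFold_keys (xs : List String) (d : PySem.Dict String Int) :
    (xs.foldl pvStep d).keys = d.keys := by
  induction xs generalizing d with
  | nil => rfl
  | cons x xs ih => simp [List.foldl_cons, ih, pvStep_keys]

lemma pvStep_getD (d : PySem.Dict String Int) (e k : String) (hk : d.contains k = true) :
    (pvStep d e).getD k 0 = d.getD k 0 + (if e = k then 1 else 0) := by
  unfold pvStep
  by_cases hek : e = k
  · subst hek
    simp [hk, PySem.Dict.getD_modify_self]
  · split
    · rw [PySem.Dict.getD_modify]
      simp [Ne.symm hek]
    · simp

lemma pvStep_contains (d : PySem.Dict String Int) (e k : String) :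
    (pvStep d e).contains k = d.contains k := by
  rw [PySem.Dict.contains_eq_decide_mem_keys, PySem.Dict.contains_eq_decide_mem_keys, pvStep_keys]

lemma pvFold_getD (xs : List String) (d : PySem.Dict String Int) (k : String)
    (hk : d.contains k = true) :
    (xs.foldl pvStep d).getD k 0 = d.getD k 0 + (xs.count k : Int) := by
  induction xs generalizing d with
  | nil => simp
  | cons x xs ih =>
    rw [List.foldl_cons, ih _ (by rw [pvStep_contains]; exact hk),
      pvStep_getD d x k hk, List.count_cons]
    by_cases hxk : x = k <;> simp [hxk] <;> ring

def pvInit : PySem.Dict String Int :=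
  ((((PySem.Dict.empty).insert "blue" 0).insert "green" 0).insert "red" 0).insert "yellow" 0

lemma pvDict_values (xs : List String) :
    (xs.foldl pvStep pvInit).values =
      [(xs.count "blue" : Int), (xs.count "green" : Int),
       (xs.count "red" : Int), (xs.count "yellow" : Int)] := by
  rw [PySem.Dict.values_eq_map_keys _ (by rw [pvFold_keys]; decide) 0, pvFold_keys]
  have hk : pvInit.keys = ["blue", "green", "red", "yellow"] := by decide
  rw [hk]
  simp only [List.map_cons, List.map_nil]
  rw [pvFold_getD _ _ _ (by decide), pvFold_getD _ _ _ (by decide),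
    pvFold_getD _ _ _ (by decide), pvFold_getD _ _ _ (by decide)]
  norm_num [show pvInit.getD "blue" 0 = 0 from by decide,
    show pvInit.getD "green" 0 = 0 from by decide,
    show pvInit.getD "red" 0 = 0 from by decide,
    show pvInit.getD "yellow" 0 = 0 from by decide]

def pvP (e : String) : Bool := ["blue", "green", "red", "yellow"].contains e

-- the filtered flat list is a permutation of the target iff each color count is 4
lemma pvPerm_iff (flat : List String) :
    (flat.filter pvP).Perm pvTarget ↔
      (flat.count "blue" = 4 ∧ flat.count "green" = 4 ∧
       flat.count "red" = 4 ∧ flat.count "yellow" = 4) := by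
  rw [List.perm_iff_count]
  constructor
  · intro h
    refine ⟨?_, ?_, ?_, ?_⟩ <;>
      [have := h "blue"; have := h "green"; have := h "red"; have := h "yellow"] <;>
      first | rw [List.count_filter (by decide)] at this <;>
      simpa [pvTarget] using this
  · rintro ⟨hb, hg, hr, hy⟩ a
    by_cases hp : pvP a = true
    · rw [List.count_filter hp]
      have : a = "blue" ∨ a = "green" ∨ a = "red" ∨ a = "yellow" := by
        simpa [pvP] using hp
      rcases this with h | h | h | h <;> subst h <;>
        simp [pvTarget, hb, hg, hr, hy, ]
    · have h1 : (flat.filter pvP).count a = 0 := by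
        refine List.count_eq_zero.mpr ?_
        intro hmem
        exact hp (List.of_mem_filter hmem)
      have h2 : pvTarget.count a = 0 := by
        refine List.count_eq_zero.mpr ?_
        intro hmem
        have : pvP a = true := by
          simp only [pvTarget, List.mem_append, List.mem_replicate] at hmem
          simp [pvP]
          tauto
        exact hp this
      rw [h1, h2]

lemma pvSorted_eq_iff (flat : List String) :
    (PySem.List.sorted (flat.filter pvP) (fun x => x) false = pvTarget) ↔
      (flat.filter pvP).Perm pvTarget := by
  have hT : PySem.List.sorted pvTarget (fun x => x) false = pvTarget :=
    PySem.List.sorted_eq_self_of_pairwise pvTarget (fun x => x)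
      (by have : List.Pairwise (fun a b : String => a ≤ b) pvTarget := by
            unfold pvTarget
            simp [String.le_iff_toList_le]
            decide
          exact this)
  constructor
  · intro h
    rw [← h]
    exact (PySem.List.sorted_perm _ _ _).symm
  · intro h
    rw [show pvTarget = PySem.List.sorted pvTarget (fun x => x) false from hT.symm]
    exact (PySem.List.sorted_id_eq_sorted_id_iff_perm _ _).mpr h

theorem checkQuart_spec : Claim_equal_checkQuart := by
  intro quart _
  unfold Spec_checkQuart checkQuart checkQuart_alt
  have hstep : (fun (d : PySem.Dict String Int) (elt : String) =>
      if d.contains elt then d.modify elt 0 (· + 1) else d) = pvStep := rfl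
  have hinit : ((((PySem.Dict.empty).insert "blue" (0 : Int)).insert "green" 0).insert "red" 0).insert "yellow" 0 = pvInit := rfl
  simp only [hstep, hinit]
  rw [PySem.List.foldl_pyRange_pyGetD quart [] (fun d row => row.foldl pvStep d) pvInit (le_refl 0)]
  simp only [Int.toNat_zero, List.drop_zero]
  rw [← List.foldl_flatten, pvDict_values]
  have hflat : quart.flatMap (fun row => row.filter pvP) = quart.flatten.filter pvP := by
    simp [List.flatMap_def, List.filter_flatten]
  show _ = (PySem.List.sorted (quart.flatMap (fun row => row.filter pvP)) (fun x => x) false == pvTarget)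
  rw [hflat]
  set flat := quart.flatten
  have hB : (PySem.List.sorted (flat.filter pvP) (fun x => x) false == pvTarget) =
      decide ((flat.count "blue" = 4 ∧ flat.count "green" = 4 ∧
        flat.count "red" = 4 ∧ flat.count "yellow" = 4)) := by
    rw [Bool.eq_iff_iff]
    simp only [beq_iff_eq, decide_eq_true_eq]
    rw [pvSorted_eq_iff, pvPerm_iff]
  rw [hB]
  rw [Bool.eq_iff_iff]
  simp only [List.all_cons, List.all_nil, Bool.and_true, Bool.and_eq_true, beq_iff_eq,
    decide_eq_true_eq]
  omega
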